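-- pv_equiv track=rewrite | github.com/JulioLaz/chat_bot_challenge_04 | utils.py | reemplazar_terminacion
-- ===== SOURCE A (Python) =====
-- def reemplazar_terminacion(frase):
--     terminaciones = ["es", "me", "as", "ste", "te"]
--     palabras = frase.split()
--
--     for i, palabra in enumerate(palabras):
--         for terminacion in terminaciones:
--             if palabra.endswith(terminacion) and len(palabra) > len(terminacion):
--                 palabras[i] = palabra[:-len(terminacion)] + "r"
--                 break
--
--     nueva_frase = " ".join(palabras)
--     return nueva_frase
-- ===== SOURCE B (Python) =====
-- import re
--
-- # One compiled regex per word: the lookbehind (?<=.) reproduces the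
-- # len(word) > len(suffix) guard and '$' anchors the suffix to the word end.
-- _PAT = re.compile(r'(?<=.)(es|me|as|ste|te)$')
--
-- def reemplazar_terminacion(frase):
--     return " ".join(_PAT.sub("r", w) for w in frase.split())
-- ===== Notes on version B (the rewrite author's own statement) =====
-- stated objective: idiomatic
-- what changed: A loops over a five-suffix list per word with endswith and a length guard; B applies one compiled regex (?<=.)(es|me|as|ste|te)$ per word with a lookbehind replacing the length guard, so the inner suffix loop disappears into a left-to-right anchored scan.
import Mathlib
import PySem

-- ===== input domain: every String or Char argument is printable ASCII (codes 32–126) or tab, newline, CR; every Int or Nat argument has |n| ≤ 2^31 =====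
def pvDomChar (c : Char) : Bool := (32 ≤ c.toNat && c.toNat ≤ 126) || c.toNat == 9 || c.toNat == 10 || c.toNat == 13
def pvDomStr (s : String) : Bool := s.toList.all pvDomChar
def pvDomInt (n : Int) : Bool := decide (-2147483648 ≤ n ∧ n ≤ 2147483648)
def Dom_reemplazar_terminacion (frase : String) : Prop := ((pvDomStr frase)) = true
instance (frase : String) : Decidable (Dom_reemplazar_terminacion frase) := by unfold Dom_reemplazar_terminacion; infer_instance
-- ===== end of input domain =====

-- B replaces A's per-word loop over a five-suffix list by one compiled regex
-- (?<=.)(es|me|as|ste|te)$ applied to each word; objective: idiomatic, same cost.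

-- ===== PORT A =====
-- the inner 'for terminacion in terminaciones: … break' loop of A, applied to one word
def pvAInner (palabra : String) : List String → String
  | [] => palabra
  | t :: rest =>
    if PySem.Str.endswith palabra t && decide (PySem.Str.len palabra > PySem.Str.len t)
    then PySem.Str.slice palabra none (some (-(PySem.Str.len t))) ++ "r"
    else pvAInner palabra rest

def reemplazar_terminacion (frase : String) : String :=
  let terminaciones : List String := ["es", "me", "as", "ste", "te"]
  let palabras := PySem.Str.split₀ frase
  let palabras := palabras.map (fun palabra => pvAInner palabra terminaciones)
  PySem.Str.join " " palabras

-- ===== PORT B =====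
-- Hand port (exact) of _PAT.sub("r", w) for _PAT = re.compile(r'(?<=.)(es|me|as|ste|te)$'):
-- re.sub scans positions left to right; the lookbehind (?<=.) admits a position only after at
-- least one character, the alternatives are tried in order, and '$' forces the match to reach
-- the word end — so a match at a position means the remaining tail is exactly one of the five
-- alternatives, and the substitution replaces that tail by "r". pvScan is that scan: acc holds
-- the characters before the current position (reversed), pvAlt is the alternation.
def pvAlt (t : List Char) : Bool :=
  t = ['e','s'] || t = ['m','e'] || t = ['a','s'] || t = ['s','t','e'] || t = ['t','e']

def pvScan : List Char → List Char → Option (List Char)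
  | _, [] => none
  | acc, c :: rest =>
    if (!acc.isEmpty) && pvAlt (c :: rest) then some (acc.reverse ++ ['r'])
    else pvScan (c :: acc) rest

def pvSub (w : List Char) : List Char := (pvScan [] w).getD w

def reemplazar_terminacion_alt (frase : String) : String :=
  PySem.Str.join " " ((PySem.Str.split₀ frase).map (fun w => String.ofList (pvSub w.toList)))

-- ===== PRECONDITION & SPEC =====
def Spec_reemplazar_terminacion (frase : String) (out : String) : Prop := out = reemplazar_terminacion_alt frase
instance (frase : String) (out : String) : Decidable (Spec_reemplazar_terminacion frase out) := by unfold Spec_reemplazar_terminacion; infer_instance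

-- ===== CLAIM (what is proved, stated in full; the proofs are below) =====
def Claim_equal_reemplazar_terminacion : Prop := ∀ (frase : String), Dom_reemplazar_terminacion frase → Spec_reemplazar_terminacion frase (reemplazar_terminacion frase)

-- ===== LEMMAS AND PROOFS =====

-- proof-side closed form of what both per-word computations amount to
def pvFix (w : List Char) : List Char :=
  let r := w.reverse
  if 3 < r.length ∧ r.take 3 = ['e', 't', 's'] then ('r' :: r.drop 3).reverse
  else if 2 < r.length ∧ (r.take 2 = ['s', 'e'] ∨ r.take 2 = ['e', 'm'] ∨
        r.take 2 = ['s', 'a'] ∨ r.take 2 = ['e', 't']) then ('r' :: r.drop 2).reverse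
  else w

theorem pv_suffix_iff_take (t p : List Char) :
    t <:+ p ↔ p.reverse.take t.length = t.reverse := by
  constructor
  · rintro ⟨s, rfl⟩
    simp
  · intro h
    refine ⟨(p.reverse.drop t.length).reverse, ?_⟩
    have := congrArg List.reverse (List.take_append_drop t.length p.reverse)
    rw [h] at this
    simpa using this

theorem pv_endswith_eq (p : String) (t : List Char) :
    PySem.Str.endswith p (String.ofList t) = decide (p.toList.reverse.take t.length = t.reverse) := by
  have h : PySem.Str.endswith p (String.ofList t) = true ↔
      p.toList.reverse.take t.length = t.reverse := by
    rw [PySem.Str.endswith_eq]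
    simp [PySem.Chars.endswith_iff, pv_suffix_iff_take]
  cases hb : PySem.Str.endswith p (String.ofList t)
  · rw [PySem.Str.endswith_eq] at hb; simp only [String.toList_ofList] at hb
    simp [hb] at h; simp [h]
  · rw [PySem.Str.endswith_eq] at hb; simp only [String.toList_ofList] at hb
    simp [hb] at h; simp [h]

theorem pv_drop_rev (q : List Char) (k : Nat) :
    (q.reverse.drop k).reverse = q.take (q.length - k) := by
  simp [List.reverse_drop]

-- A's per-word loop computes pvFix
theorem pv_word_eq_A (p : String) :
    (pvAInner p ["es", "me", "as", "ste", "te"]).toList = pvFix p.toList := by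
  have c2 : (PySem.Str.len p > (2 : Int)) ↔ 2 < p.toList.length := by
    rw [PySem.Str.len_eq]; exact_mod_cast Iff.rfl
  have c3 : (PySem.Str.len p > (3 : Int)) ↔ 3 < p.toList.length := by
    rw [PySem.Str.len_eq]; exact_mod_cast Iff.rfl
  simp only [pvAInner, pvFix,
    show ("es" : String) = String.ofList ['e', 's'] from rfl,
    show ("me" : String) = String.ofList ['m', 'e'] from rfl,
    show ("as" : String) = String.ofList ['a', 's'] from rfl,
    show ("ste" : String) = String.ofList ['s', 't', 'e'] from rfl,
    show ("te" : String) = String.ofList ['t', 'e'] from rfl,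
    show PySem.Str.len (String.ofList ['e', 's']) = 2 from rfl,
    show PySem.Str.len (String.ofList ['m', 'e']) = 2 from rfl,
    show PySem.Str.len (String.ofList ['a', 's']) = 2 from rfl,
    show PySem.Str.len (String.ofList ['s', 't', 'e']) = 3 from rfl,
    show PySem.Str.len (String.ofList ['t', 'e']) = 2 from rfl,
    pv_endswith_eq, c2, c3, Bool.and_eq_true, decide_eq_true_eq,
    List.length_cons, List.length_nil, List.reverse_cons, List.reverse_nil,
    List.nil_append, List.cons_append, List.length_reverse,
    show (0 + 1 + 1 : Nat) = 2 from rfl, show (0 + 1 + 1 + 1 : Nat) = 3 from rfl]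
  by_cases h3 : List.take 3 p.toList.reverse = ['e', 't', 's'] <;>
    by_cases hse : List.take 2 p.toList.reverse = ['s', 'e'] <;>
      by_cases hem : List.take 2 p.toList.reverse = ['e', 'm'] <;>
        by_cases hsa : List.take 2 p.toList.reverse = ['s', 'a'] <;>
          by_cases het : List.take 2 p.toList.reverse = ['e', 't'] <;>
            by_cases hL3 : 3 < p.toList.length <;>
              by_cases hL2 : 2 < p.toList.length <;>
  first
  | (exact absurd (hse.symm.trans hem) (by decide))
  | (exact absurd (hse.symm.trans hsa) (by decide))
  | (exact absurd (hse.symm.trans het) (by decide))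
  | (exact absurd (hem.symm.trans hsa) (by decide))
  | (exact absurd (hem.symm.trans het) (by decide))
  | (exact absurd (hsa.symm.trans het) (by decide))
  | (exact absurd (by have h := congrArg (List.take 2) h3
                      simpa [List.take_take] using h) het)
  | omega
  | (simp [h3, hse, hem, hsa, het, pv_drop_rev]
     try (split_ifs <;>
       simp [PySem.Str.toList_slice,
         PySem.List.slice_to_neg_ofNat _ 2 (by norm_num : (1 : Nat) < 2),
         PySem.List.slice_to_neg_ofNat _ 3 (by norm_num : (1 : Nat) < 3)]))

theorem pv_drop_eq_iff_suffix (w t : List Char) :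
    w.drop (w.length - t.length) = t ↔ t <:+ w := by
  constructor
  · intro h; rw [← h]; exact List.drop_suffix _ _
  · rintro ⟨s, rfl⟩
    simp

-- closed form of the regex scan, for a position after at least one character
theorem pvScan_spec (w : List Char) : ∀ acc : List Char, acc ≠ [] →
    pvScan acc w =
      if w.drop (w.length - 3) = ['s','t','e'] then
        some (acc.reverse ++ w.take (w.length - 3) ++ ['r'])
      else if pvAlt (w.drop (w.length - 2)) = true then
        some (acc.reverse ++ w.take (w.length - 2) ++ ['r'])
      else none := by
  induction w with
  | nil => intro acc hacc; simp [pvScan, pvAlt]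
  | cons c rest ih =>
    intro acc hacc
    have hne : (!acc.isEmpty) = true := by simp [hacc]
    by_cases hA : pvAlt (c :: rest) = true
    · have hstep : pvScan acc (c :: rest) = some (acc.reverse ++ ['r']) := by
        simp [pvScan, hne, hA]
      rw [hstep]
      have hcase := hA
      simp only [pvAlt, Bool.or_eq_true, decide_eq_true_eq] at hcase
      rcases hcase with ((((h | h) | h) | h) | h) <;> rw [h] <;> simp [pvAlt]
    · have hstep : pvScan acc (c :: rest) = pvScan (c :: acc) rest := by
        simp [pvScan, hne, hA]
      rw [hstep, ih (c :: acc) (by simp)]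
      have hA' : pvAlt (c :: rest) = false := by
        revert hA; cases pvAlt (c :: rest) <;> simp
      rcases rest with _ | ⟨a, rest⟩
      · simp [pvAlt]
      rcases rest with _ | ⟨b, rest⟩
      · -- w = [c, a]
        simp [pvAlt] at hA'
        simpa [pvAlt] using hA'
      rcases rest with _ | ⟨d, rest⟩
      · -- w = [c, a, b]
        have hste : ¬([c, a, b] = ['s', 't', 'e']) := by
          intro h; rw [h] at hA'; simp [pvAlt] at hA'
        simp only [List.length_cons, List.length_nil]
        norm_num
        intro rfl rfl hb
        exact hste (by rw [hb])
      · -- w = c :: a :: b :: d :: rest, length ≥ 4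
        have e3 : (c :: a :: b :: d :: rest).length - 3
            = ((a :: b :: d :: rest).length - 3) + 1 := by simp
        have e2 : (c :: a :: b :: d :: rest).length - 2
            = ((a :: b :: d :: rest).length - 2) + 1 := by simp
        rw [e3, e2, List.drop_succ_cons, List.drop_succ_cons,
            List.take_succ_cons, List.take_succ_cons]
        split_ifs <;> simp

-- a length-k suffix check at position (length - k), transported through the reversal
theorem pv_bridge (rest : List Char) (c : Char) (t : List Char) :
    rest.drop (rest.length - t.length) = t ↔
      (t.length ≤ rest.length ∧ (rest.reverse ++ [c]).take t.length = t.reverse) := by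
  constructor
  · intro h
    have hsuf : t <:+ rest := (pv_drop_eq_iff_suffix rest t).mp h
    have hm : t.length ≤ rest.length := hsuf.length_le
    have htake : rest.reverse.take t.length = t.reverse := (pv_suffix_iff_take t rest).mp hsuf
    exact ⟨hm, by rw [List.take_append_of_le_length (by simpa using hm)]; exact htake⟩
  · rintro ⟨h1, h2⟩
    rw [List.take_append_of_le_length (by simpa using h1)] at h2
    exact (pv_drop_eq_iff_suffix rest t).mpr ((pv_suffix_iff_take t rest).mpr h2)

theorem pvSub_eq_fix (w : List Char) : pvSub w = pvFix w := by
  rcases w with _ | ⟨c, rest⟩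
  · rfl
  unfold pvSub
  have hstep : pvScan [] (c :: rest) = pvScan [c] rest := by simp [pvScan]
  rw [hstep, pvScan_spec rest [c] (by simp)]
  have a2 : pvAlt (rest.drop (rest.length - 2)) = true ↔
      (2 ≤ rest.length ∧ ((rest.reverse ++ [c]).take 2 = ['s', 'e'] ∨
        (rest.reverse ++ [c]).take 2 = ['e', 'm'] ∨
        (rest.reverse ++ [c]).take 2 = ['s', 'a'] ∨
        (rest.reverse ++ [c]).take 2 = ['e', 't'])) := by
    simp only [pvAlt, Bool.or_eq_true, decide_eq_true_eq]
    constructor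
    · rintro (((( h | h) | h) | h) | h)
      · have := (pv_bridge rest c ['e', 's']).mp (by simpa using h)
        exact ⟨by simpa using this.1, Or.inl (by simpa using this.2)⟩
      · have := (pv_bridge rest c ['m', 'e']).mp (by simpa using h)
        exact ⟨by simpa using this.1, Or.inr (Or.inl (by simpa using this.2))⟩
      · have := (pv_bridge rest c ['a', 's']).mp (by simpa using h)
        exact ⟨by simpa using this.1, Or.inr (Or.inr (Or.inl (by simpa using this.2)))⟩
      · exfalso
        have := congrArg List.length h
        simp [List.length_drop] at this
        omega
      · have := (pv_bridge rest c ['t', 'e']).mp (by simpa using h)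
        exact ⟨by simpa using this.1, Or.inr (Or.inr (Or.inr (by simpa using this.2)))⟩
    · rintro ⟨hlen, (h | h | h | h)⟩
      · exact Or.inl (Or.inl (Or.inl (Or.inl
          (by simpa using (pv_bridge rest c ['e', 's']).mpr ⟨by simpa using hlen, by simpa using h⟩))))
      · exact Or.inl (Or.inl (Or.inl (Or.inr
          (by simpa using (pv_bridge rest c ['m', 'e']).mpr ⟨by simpa using hlen, by simpa using h⟩))))
      · exact Or.inl (Or.inl (Or.inr
          (by simpa using (pv_bridge rest c ['a', 's']).mpr ⟨by simpa using hlen, by simpa using h⟩)))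
      · exact Or.inr
          (by simpa using (pv_bridge rest c ['t', 'e']).mpr ⟨by simpa using hlen, by simpa using h⟩)
  by_cases h3 : 3 ≤ rest.length ∧ (rest.reverse ++ [c]).take 3 = ['e', 't', 's']
  · have d3 : rest.drop (rest.length - 3) = ['s', 't', 'e'] :=
      (pv_bridge rest c ['s', 't', 'e']).mpr ⟨by simpa using h3.1, by simpa using h3.2⟩
    rw [if_pos d3]
    have hm : 3 ≤ rest.length := h3.1
    have e : (c :: rest).length - 3 = (rest.length - 3) + 1 := by simp; omega
    simp only [pvFix, List.reverse_cons, List.length_append, List.length_reverse,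
      List.length_cons, List.length_nil]
    rw [if_pos (by constructor; omega; exact h3.2)]
    rw [← List.reverse_cons (as := rest), pv_drop_rev, e, List.take_succ_cons]
    simp
  · have d3 : ¬(rest.drop (rest.length - 3) = ['s', 't', 'e']) := by
      intro h
      have := (pv_bridge rest c ['s', 't', 'e']).mp h
      exact h3 ⟨by simpa using this.1, by simpa using this.2⟩
    rw [if_neg d3]
    by_cases h2 : 2 ≤ rest.length ∧ ((rest.reverse ++ [c]).take 2 = ['s', 'e'] ∨
        (rest.reverse ++ [c]).take 2 = ['e', 'm'] ∨
        (rest.reverse ++ [c]).take 2 = ['s', 'a'] ∨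
        (rest.reverse ++ [c]).take 2 = ['e', 't'])
    · rw [if_pos (a2.mpr h2)]
      have hm : 2 ≤ rest.length := h2.1
      have e : (c :: rest).length - 2 = (rest.length - 2) + 1 := by simp; omega
      simp only [pvFix, List.reverse_cons, List.length_append, List.length_reverse,
        List.length_cons, List.length_nil]
      rw [if_neg (fun hh => h3 ⟨by omega, hh.2⟩), if_pos (⟨by omega, h2.2⟩ :
        2 < rest.length + (0 + 1) ∧ _)]
      rw [← List.reverse_cons (as := rest), pv_drop_rev, e, List.take_succ_cons]
      simp
    · rw [if_neg (fun h => h2 (a2.mp h))]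
      simp only [pvFix, List.reverse_cons, List.length_append, List.length_reverse,
        List.length_cons, List.length_nil]
      rw [if_neg (fun hh => h3 ⟨by omega, hh.2⟩), if_neg (fun hh => h2 ⟨by omega, hh.2⟩)]
      rfl

-- ===== VERDICT (by name: the statement is the Claim_ definition above) =====
theorem reemplazar_terminacion_spec : Claim_equal_reemplazar_terminacion := by
  intro frase _
  unfold Spec_reemplazar_terminacion reemplazar_terminacion reemplazar_terminacion_alt
  have hmap : (PySem.Str.split₀ frase).map
        (fun palabra => pvAInner palabra ["es", "me", "as", "ste", "te"])
      = (PySem.Str.split₀ frase).map (fun w => String.ofList (pvSub w.toList)) := by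
    apply List.map_congr_left
    intro w _
    apply String.toList_inj.mp
    rw [pv_word_eq_A, pvSub_eq_fix]
    simp
  simp only [hmap]
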